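-- pv_equiv track=rewrite | github.com/jiashenggu/daily_coding | Hash.py | longestCommonSubpath
-- ===== SOURCE A (Python) =====
-- from typing import List
--
-- class RabinKarp:
--     def __init__(self, s):
--         self.mod = 10 ** 18
--         self.pow = [1]
--         self.roll = [0]
--
--         p = 10 ** 9 + 7
--         for x in s:
--             self.pow.append(self.pow[-1] * p % self.mod)
--             self.roll.append((self.roll[-1] * p + x) % self.mod)
--
--     def query(self, i, j):
--         return (self.roll[j] - self.roll[i] * self.pow[j - i]) % self.mod
--
-- def longestCommonSubpath(n: int, paths: List[List[int]]) -> int: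
--     rks = [RabinKarp(path) for path in paths]
--
--     def fn(x):
--         seen = set()
--         for rk, path in zip(rks, paths):
--             vals = {rk.query(i, i + x) for i in range(len(path) - x + 1)}
--             if not seen:
--                 seen = vals
--             seen &= vals
--             if not seen:
--                 return False
--         return True
--
--     lo, hi = 0, len(paths[0])
--     while lo < hi:
--         mid = (lo + hi + 1) // 2
--         if fn(mid):
--             lo = mid
--         else:
--             hi = mid - 1
--     return lo
-- ===== SOURCE B (Python) =====
-- from typing import List
--
-- def longestCommonSubpath(n: int, paths: List[List[int]]) -> int:
--     MOD = 10 ** 18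
--     P = 10 ** 9 + 7
--
--     def window_hash(w):
--         h = 0
--         for v in w:
--             h = (h * P + v) % MOD
--         return h
--
--     def window_hashes(path, x):
--         return {window_hash(path[i:i + x]) for i in range(len(path) - x + 1)}
--
--     def feasible(x):
--         sets = [window_hashes(path, x) for path in paths]
--         common = sets[0]
--         for s in sets[1:]:
--             common = common & s
--         return len(common) > 0
--
--     def search(lo, hi):
--         if lo >= hi:
--             return lo
--         mid = (lo + hi + 1) // 2
--         return search(mid, hi) if feasible(mid) else search(lo, mid - 1)
--
--     return search(0, len(paths[0]))
-- ===== Notes on version B (the rewrite author's own statement) =====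
-- stated objective: alternative
-- what changed: B drops the RabinKarp prefix/power tables and incremental early-exit set intersection: it hashes each length-x window slice directly with a Horner fold, intersects the per-path hash sets with a single fold, and writes the binary search as a recursion instead of A's while loop.
import Mathlib
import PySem

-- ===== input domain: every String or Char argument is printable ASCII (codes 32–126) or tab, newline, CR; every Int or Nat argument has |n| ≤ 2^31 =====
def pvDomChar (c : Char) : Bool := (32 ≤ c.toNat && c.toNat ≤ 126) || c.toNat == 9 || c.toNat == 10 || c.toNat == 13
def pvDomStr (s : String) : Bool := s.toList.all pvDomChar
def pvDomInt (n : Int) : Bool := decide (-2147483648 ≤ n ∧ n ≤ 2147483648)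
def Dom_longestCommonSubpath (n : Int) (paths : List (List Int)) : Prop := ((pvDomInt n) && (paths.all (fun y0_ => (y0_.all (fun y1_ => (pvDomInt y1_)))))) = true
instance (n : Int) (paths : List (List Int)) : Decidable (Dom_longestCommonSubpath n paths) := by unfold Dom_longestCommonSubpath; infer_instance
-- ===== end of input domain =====

-- B replaces A's per-path RabinKarp prefix/power tables and incremental early-exit set
-- intersection by direct Horner hashing of each window slice and a single fold of set
-- intersections, with the binary search written recursively (objective: alternative).

-- ===== PORT A =====
def pvM : Int := 1000000000000000000
def pvP : Int := 1000000007

-- RabinKarp.__init__: returns (self.pow, self.roll); pow[-1]/roll[-1] via pyGetD (lists are never empty)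
def pvRKBuild (s : List Int) : List Int × List Int :=
  s.foldl (fun pr x =>
      (pr.1 ++ [PySem.Int.mod (PySem.List.pyGetD pr.1 (-1) 0 * pvP) pvM],
       pr.2 ++ [PySem.Int.mod (PySem.List.pyGetD pr.2 (-1) 0 * pvP + x) pvM]))
    ([1], [0])

-- RabinKarp.query(i, j); indices are always in range at call sites, so pyGetD is exact there
def pvRKQuery (rk : List Int × List Int) (i j : Int) : Int :=
  PySem.Int.mod (PySem.List.pyGetD rk.2 j 0 - PySem.List.pyGetD rk.2 i 0 * PySem.List.pyGetD rk.1 (j - i) 0) pvM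

-- the loop body of fn: iterate over zip(rks, paths) carrying seen, with the early return False
def pvFnGo (x : Int) : List ((List Int × List Int) × List Int) → PySem.Set Int → Bool
  | [], _ => true
  | (rk, path) :: rest, seen =>
    let vals : PySem.Set Int :=
      PySem.Set.ofList ((PySem.List.pyRange 0 ((path.length : Int) - x + 1) 1).map
        (fun i => pvRKQuery rk i (i + x)))
    let seen1 := if seen.isEmpty then vals else seen
    let seen2 := PySem.Set.inter seen1 vals
    if seen2.isEmpty then false else pvFnGo x rest seen2

-- termination helper for both binary searches (mid = (lo+hi+1)//2)
theorem pvMid_bounds (lo hi : Int) (h : lo < hi) :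
    lo < PySem.Int.floordiv (lo + hi + 1) 2 ∧ PySem.Int.floordiv (lo + hi + 1) 2 ≤ hi := by
  rw [PySem.Int.floordiv_eq_ediv_of_pos (by norm_num)]; omega

-- the while-loop binary search of A
def pvBSearchA (rks : List (List Int × List Int)) (paths : List (List Int)) (lo hi : Int) : Int :=
  if h : lo < hi then
    let mid := PySem.Int.floordiv (lo + hi + 1) 2
    if pvFnGo mid (rks.zip paths) PySem.Set.empty then pvBSearchA rks paths mid hi
    else pvBSearchA rks paths lo (mid - 1)
  else lo
termination_by (hi - lo).toNat
decreasing_by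
  · have := pvMid_bounds lo hi h; omega
  · have := pvMid_bounds lo hi h; omega

-- paths[0] raises IndexError on empty paths (excluded by Pre_); pyGetD is exact elsewhere
def longestCommonSubpath (n : Int) (paths : List (List Int)) : Int :=
  pvBSearchA (paths.map pvRKBuild) paths 0 ((PySem.List.pyGetD paths 0 []).length : Int)

-- ===== PORT B =====
-- window_hash: Horner fold over the window
def pvWinHash (w : List Int) : Int :=
  w.foldl (fun h v => PySem.Int.mod (h * pvP + v) pvM) 0

-- window_hashes(path, x): hash every length-x slice
def pvWinHashes (path : List Int) (x : Int) : PySem.Set Int :=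
  PySem.Set.ofList ((PySem.List.pyRange 0 ((path.length : Int) - x + 1) 1).map
    (fun i => pvWinHash (PySem.List.slice path (some i) (some (i + x)))))

-- feasible(x): intersect all per-path hash sets, then test emptiness (sets[0] is only read
-- under Pre_, where paths is nonempty; headD is exact there)
def pvFeasibleB (paths : List (List Int)) (x : Int) : Bool :=
  let sets := paths.map (fun p => pvWinHashes p x)
  let common := (sets.drop 1).foldl PySem.Set.inter (sets.headD PySem.Set.empty)
  !common.isEmpty

-- search(lo, hi): recursive binary search
def pvSearchB (paths : List (List Int)) (lo hi : Int) : Int :=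
  if h : lo ≥ hi then lo
  else
    let mid := PySem.Int.floordiv (lo + hi + 1) 2
    if pvFeasibleB paths mid then pvSearchB paths mid hi else pvSearchB paths lo (mid - 1)
termination_by (hi - lo).toNat
decreasing_by
  · have := pvMid_bounds lo hi (by omega); omega
  · have := pvMid_bounds lo hi (by omega); omega

def longestCommonSubpath_alt (n : Int) (paths : List (List Int)) : Int :=
  pvSearchB paths 0 ((PySem.List.pyGetD paths 0 []).length : Int)

-- ===== PRECONDITION & SPEC =====
-- Pre_ excludes only paths = [], where A raises IndexError on paths[0]
def Pre_longestCommonSubpath (n : Int) (paths : List (List Int)) : Prop := paths ≠ []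
instance (n : Int) (paths : List (List Int)) : Decidable (Pre_longestCommonSubpath n paths) := by
  unfold Pre_longestCommonSubpath; infer_instance

def pvWitness_longestCommonSubpath : Int × List (List Int) := (2, [[1, 2, 3], [2, 3, 4]])

def Spec_longestCommonSubpath (n : Int) (paths : List (List Int)) (out : Int) : Prop := out = longestCommonSubpath_alt n paths
instance (n : Int) (paths : List (List Int)) (out : Int) : Decidable (Spec_longestCommonSubpath n paths out) := by unfold Spec_longestCommonSubpath; infer_instance

-- ===== CLAIM (what is proved, stated in full; the proofs are below) =====
def Claim_equal_longestCommonSubpath : Prop := ∀ (n : Int) (paths : List (List Int)), Dom_longestCommonSubpath n paths → Pre_longestCommonSubpath n paths → Spec_longestCommonSubpath n paths (longestCommonSubpath n paths)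

-- ===== LEMMAS AND PROOFS =====

def pvPowL (s : List Int) : List Int := (List.range (s.length+1)).map (fun k => pvP ^ k % pvM)
def pvRollL (s : List Int) : List Int := (List.range (s.length+1)).map (fun k => pvWinHash (s.take k))

theorem pvM_pos : (0:Int) < pvM := by norm_num [pvM]

theorem pvWinHash_append_singleton (w : List Int) (x : Int) :
    pvWinHash (w ++ [x]) = (pvWinHash w * pvP + x) % pvM := by
  simp [pvWinHash, List.foldl_append, PySem.Int.mod_eq_emod_of_pos pvM_pos]

theorem pvRKBuild_aux (s pre : List Int) :
    s.foldl (fun pr x =>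
      (pr.1 ++ [PySem.Int.mod (PySem.List.pyGetD pr.1 (-1) 0 * pvP) pvM],
       pr.2 ++ [PySem.Int.mod (PySem.List.pyGetD pr.2 (-1) 0 * pvP + x) pvM]))
      (pvPowL pre, pvRollL pre) = (pvPowL (pre ++ s), pvRollL (pre ++ s)) := by
  induction s generalizing pre with
  | nil => simp
  | cons x s ih =>
    have hstep : (pvPowL pre ++ [PySem.Int.mod (PySem.List.pyGetD (pvPowL pre) (-1) 0 * pvP) pvM],
        pvRollL pre ++ [PySem.Int.mod (PySem.List.pyGetD (pvRollL pre) (-1) 0 * pvP + x) pvM])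
        = (pvPowL (pre ++ [x]), pvRollL (pre ++ [x])) := by
      have hpow : pvPowL pre = (List.range pre.length).map (fun k => pvP ^ k % pvM) ++ [pvP ^ pre.length % pvM] := by
        simp [pvPowL, List.range_succ]
      have hroll : pvRollL pre = (List.range pre.length).map (fun k => pvWinHash (pre.take k)) ++ [pvWinHash pre] := by
        simp [pvRollL, List.range_succ]
      rw [Prod.mk.injEq]; constructor
      · rw [hpow, PySem.List.pyGetD_neg_one_append_singleton]
        simp only [pvPowL, List.length_append, List.length_singleton]
        rw [show pre.length + 1 + 1 = pre.length + 1 + 1 from rfl, List.range_succ, List.map_append]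
        congr 1
        · simp [List.range_succ]
        · simp [PySem.Int.mod_eq_emod_of_pos pvM_pos, pow_succ, Int.mul_emod]
      · rw [hroll, PySem.List.pyGetD_neg_one_append_singleton]
        simp only [pvRollL, List.length_append, List.length_singleton]
        rw [List.range_succ, List.map_append]
        congr 1
        · rw [List.range_succ, List.map_append]
          congr 1
          · apply List.map_congr_left
            intro k hk; rw [List.mem_range] at hk
            rw [List.take_append_of_le_length (by omega)]
          · simp only [List.map_cons, List.map_nil]
            rw [List.take_append_of_le_length (le_refl _), List.take_length]
        · simp only [List.map_cons, List.map_nil]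
          rw [List.take_of_length_le (by simp)]
          rw [pvWinHash_append_singleton]
          simp [PySem.Int.mod_eq_emod_of_pos pvM_pos]
    rw [List.foldl_cons, hstep, ih]; simp

theorem pvRKBuild_eq (s : List Int) : pvRKBuild s = (pvPowL s, pvRollL s) := by
  have h0 : (([1], [0]) : List Int × List Int) = (pvPowL [], pvRollL []) := by
    norm_num [pvPowL, pvRollL, pvWinHash, pvM]
  rw [pvRKBuild, h0, pvRKBuild_aux, List.nil_append]


theorem pvWinHash_emod (w : List Int) :
    pvWinHash w = w.foldl (fun h v => (h * pvP + v) % pvM) 0 := by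
  simp [pvWinHash, PySem.Int.mod_eq_emod_of_pos pvM_pos]

theorem pvH_reduced_aux (w : List Int) : ∀ a : Int, a % pvM = a →
    (w.foldl (fun h v => (h * pvP + v) % pvM) a) % pvM = w.foldl (fun h v => (h * pvP + v) % pvM) a := by
  induction w with
  | nil => intro a h; exact h
  | cons v w ih =>
    intro a _
    exact ih _ (Int.emod_emod_of_dvd _ dvd_rfl)

theorem pvHFrom (w : List Int) : ∀ a : Int,
    (w.foldl (fun h v => (h * pvP + v) % pvM) a) % pvM
      = (a * pvP ^ w.length + w.foldl (fun h v => (h * pvP + v) % pvM) 0) % pvM := by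
  induction w with
  | nil => intro a; simp
  | cons v w ih =>
    intro a
    simp only [List.foldl_cons, List.length_cons, zero_mul, zero_add]
    have hB : List.foldl (fun h v => (h * pvP + v) % pvM) (v % pvM) w
        = ((v % pvM) * pvP ^ w.length + List.foldl (fun h v => (h * pvP + v) % pvM) 0 w) % pvM := by
      rw [← ih (v % pvM)]
      exact (pvH_reduced_aux w (v % pvM) (Int.emod_emod_of_dvd _ dvd_rfl)).symm
    rw [ih ((a * pvP + v) % pvM), hB]
    show Int.ModEq pvM _ _
    have hself : ∀ x : Int, Int.ModEq pvM (x % pvM) x := fun x => Int.emod_emod_of_dvd x dvd_rfl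
    calc (a * pvP + v) % pvM * pvP ^ w.length + List.foldl (fun h v => (h * pvP + v) % pvM) 0 w
        ≡ (a * pvP + v) * pvP ^ w.length + List.foldl (fun h v => (h * pvP + v) % pvM) 0 w [ZMOD pvM] :=
          Int.ModEq.add_right _ (Int.ModEq.mul_right _ (hself _))
      _ = a * pvP ^ (w.length + 1) + (v * pvP ^ w.length + List.foldl (fun h v => (h * pvP + v) % pvM) 0 w) := by ring
      _ ≡ a * pvP ^ (w.length + 1) + (v % pvM * pvP ^ w.length + List.foldl (fun h v => (h * pvP + v) % pvM) 0 w) [ZMOD pvM] :=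
          Int.ModEq.add_left _ (Int.ModEq.add_right _ (Int.ModEq.mul_right _ (hself _).symm))
      _ ≡ a * pvP ^ (w.length + 1) + (v % pvM * pvP ^ w.length + List.foldl (fun h v => (h * pvP + v) % pvM) 0 w) % pvM [ZMOD pvM] :=
          Int.ModEq.add_left _ (hself _).symm

theorem pvQuery_eq (s : List Int) (i x : Int) (hi : 0 ≤ i) (hx : 0 ≤ x) (hle : i + x ≤ (s.length : Int)) :
    pvRKQuery (pvRKBuild s) i (i + x) = pvWinHash ((s.drop i.toNat).take x.toNat) := by
  have hlenR : ((pvRollL s).length : Int) = (s.length : Int) + 1 := by simp [pvRollL]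
  have hlenP : ((pvPowL s).length : Int) = (s.length : Int) + 1 := by simp [pvPowL]
  rw [pvRKBuild_eq]
  unfold pvRKQuery
  dsimp only
  rw [show i + x - i = x by ring]
  rw [PySem.List.pyGetD_eq_getElem _ _ (by omega) (by omega),
      PySem.List.pyGetD_eq_getElem _ _ hi (by omega),
      PySem.List.pyGetD_eq_getElem _ _ hx (by omega)]
  have hgR : ∀ (k : Nat) (h : k < (pvRollL s).length), (pvRollL s)[k] = pvWinHash (s.take k) := by
    intro k h; simp [pvRollL]
  have hgP : ∀ (k : Nat) (h : k < (pvPowL s).length), (pvPowL s)[k] = pvP ^ k % pvM := by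
    intro k h; simp [pvPowL]
  rw [hgR _ _, hgR _ _, hgP _ _]
  rw [PySem.Int.mod_eq_emod_of_pos pvM_pos]
  have hsplit : s.take (i + x).toNat = s.take i.toNat ++ (s.drop i.toNat).take x.toNat := by
    rw [show (i + x).toNat = i.toNat + x.toNat by omega, List.take_add]
  rw [hsplit]
  simp only [pvWinHash_emod, List.foldl_append]
  set f := fun (h v : Int) => (h * pvP + v) % pvM with hf
  set R := List.foldl f 0 (s.take i.toNat) with hR
  set w := (s.drop i.toNat).take x.toNat with hw
  have hlw : w.length = x.toNat := by
    rw [hw]; rw [List.length_take, List.length_drop]; omega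
  have h1 : Int.ModEq pvM (List.foldl f R w) (R * pvP ^ x.toNat + List.foldl f 0 w) := by
    show _ % pvM = _ % pvM
    rw [pvHFrom w R, hlw]
  have h2 : Int.ModEq pvM (R * (pvP ^ x.toNat % pvM)) (R * pvP ^ x.toNat) :=
    Int.ModEq.mul_left _ (Int.emod_emod_of_dvd _ dvd_rfl)
  have h3 : Int.ModEq pvM (List.foldl f R w - R * (pvP ^ x.toNat % pvM)) (List.foldl f 0 w) := by
    calc List.foldl f R w - R * (pvP ^ x.toNat % pvM)
        ≡ (R * pvP ^ x.toNat + List.foldl f 0 w) - R * pvP ^ x.toNat [ZMOD pvM] := Int.ModEq.sub h1 h2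
      _ = List.foldl f 0 w := by ring
  have h4 : List.foldl f 0 w % pvM = List.foldl f 0 w := pvH_reduced_aux w 0 (by simp)
  rw [← h4]
  exact h3

theorem pvVals_eq (path : List Int) (x : Int) (hx : 0 ≤ x) :
    PySem.Set.ofList ((PySem.List.pyRange 0 ((path.length : Int) - x + 1) 1).map
      (fun i => pvRKQuery (pvRKBuild path) i (i + x))) = pvWinHashes path x := by
  unfold pvWinHashes
  congr 1
  apply List.map_congr_left
  intro i hi
  rw [PySem.List.mem_pyRange_one] at hi
  rw [pvQuery_eq path i x hi.1 hx (by omega)]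
  rw [PySem.List.slice_of_nonneg path hi.1 (by omega) (by omega) (by omega)]
  rw [show (i + x).toNat - i.toNat = x.toNat by omega]

-- proof-side abstract loop over the per-path hash sets
def pvGo' : List (PySem.Set Int) → PySem.Set Int → Bool
  | [], _ => true
  | S :: rest, seen =>
    let seen1 := if seen.isEmpty then S else seen
    let seen2 := PySem.Set.inter seen1 S
    if seen2.isEmpty then false else pvGo' rest seen2

theorem pvFnGo_eq_go' (x : Int) (hx : 0 ≤ x) :
    ∀ (paths : List (List Int)) (seen : PySem.Set Int),
      pvFnGo x ((paths.map pvRKBuild).zip paths) seen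
        = pvGo' (paths.map (fun p => pvWinHashes p x)) seen := by
  intro paths
  induction paths with
  | nil => intro seen; rfl
  | cons p ps ih =>
    intro seen
    simp only [List.map_cons, List.zip_cons_cons, pvFnGo, pvGo']
    rw [pvVals_eq p x hx]
    simp only [ih]

theorem pvInter_nil_foldl (l : List (PySem.Set Int)) :
    l.foldl PySem.Set.inter ([] : PySem.Set Int) = [] := by
  induction l with
  | nil => rfl
  | cons S l ih => simpa [PySem.Set.inter] using ih

theorem pvInter_self (S : PySem.Set Int) : PySem.Set.inter S S = S := by
  unfold PySem.Set.inter
  apply List.filter_eq_self.mpr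
  intro a ha
  simpa [PySem.Set.contains_eq_listContains] using ha

theorem pvGo'_foldl : ∀ (sets : List (PySem.Set Int)) (seen : PySem.Set Int), seen ≠ [] →
    pvGo' sets seen = !(sets.foldl PySem.Set.inter seen).isEmpty := by
  intro sets
  induction sets with
  | nil => intro seen h; simp [pvGo', h]
  | cons S rest ih =>
    intro seen h
    have hne : seen.isEmpty = false := by
      cases seen with
      | nil => exact absurd rfl h
      | cons a l => rfl
    simp only [pvGo', hne, List.foldl_cons]
    by_cases h2 : (PySem.Set.inter seen S).isEmpty
    · have : PySem.Set.inter seen S = [] := by simpa [List.isEmpty_iff] using h2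
      simp [this, pvInter_nil_foldl]
    · simp only [h2, if_false, Bool.false_eq_true]
      exact ih _ (by simpa [List.isEmpty_iff] using h2)

theorem pvFn_eq_feasible (paths : List (List Int)) (hne : paths ≠ []) (x : Int) (hx : 0 ≤ x) :
    pvFnGo x ((paths.map pvRKBuild).zip paths) PySem.Set.empty = pvFeasibleB paths x := by
  obtain ⟨p, ps, rfl⟩ : ∃ p ps, paths = p :: ps := by
    cases paths with
    | nil => exact absurd rfl hne
    | cons p ps => exact ⟨p, ps, rfl⟩
  rw [pvFnGo_eq_go' x hx]
  simp only [List.map_cons, pvGo', pvFeasibleB, List.headD_cons, List.drop_one, List.tail_cons,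
    PySem.Set.empty, List.isEmpty_nil, if_true]
  rw [pvInter_self]
  by_cases h : (pvWinHashes p x).isEmpty
  · have hnil : pvWinHashes p x = [] := by simpa [List.isEmpty_iff] using h
    simp [hnil, pvInter_nil_foldl]
  · simp only [h, if_false, Bool.false_eq_true]
    exact pvGo'_foldl _ _ (by simpa [List.isEmpty_iff] using h)

theorem pvSearch_eq (paths : List (List Int)) (hne : paths ≠ []) :
    ∀ (lo hi : Int), 0 ≤ lo →
      pvBSearchA (paths.map pvRKBuild) paths lo hi = pvSearchB paths lo hi := by
  intro lo hi h0
  fun_induction pvBSearchA (paths.map pvRKBuild) paths lo hi with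
  | case1 lo hi h mid hfn ih =>
    rw [pvSearchB]
    have hm := pvMid_bounds lo hi h
    rw [pvFn_eq_feasible paths hne mid (by omega)] at hfn
    rw [show PySem.Int.floordiv (lo + hi + 1) 2 = mid from rfl]
    simp only [show ¬ lo ≥ hi by omega, dif_neg, not_false_iff, hfn]
    exact ih (by omega)
  | case2 lo hi h mid hfn ih =>
    rw [pvSearchB]
    have hm := pvMid_bounds lo hi h
    rw [pvFn_eq_feasible paths hne mid (by omega)] at hfn
    rw [show PySem.Int.floordiv (lo + hi + 1) 2 = mid from rfl]
    simp only [show ¬ lo ≥ hi by omega, dif_neg, not_false_iff, hfn]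
    exact ih h0
  | case3 lo hi h =>
    rw [pvSearchB]
    simp only [show lo ≥ hi by omega, dif_pos]

theorem longestCommonSubpath_equiv (n : Int) (paths : List (List Int)) (h : paths ≠ []) :
    longestCommonSubpath n paths = longestCommonSubpath_alt n paths := by
  unfold longestCommonSubpath longestCommonSubpath_alt
  exact pvSearch_eq paths h 0 _ le_rfl

-- ===== VERDICT (by name: the statement is the Claim_ definition above) =====
theorem longestCommonSubpath_spec : Claim_equal_longestCommonSubpath := by
  intro n paths _ hpre
  exact longestCommonSubpath_equiv n paths hpre
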